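-- pv_equiv track=rewrite | github.com/VeregaS/EGE2024 | 23/6500.py | f
-- ===== SOURCE A (Python) =====
-- def f(start, end, count_1):
--     if start == end:
--         return 1
--     if start > end or start == 11 or start == 35:
--         return 0
--     if start < end:
--         if count_1 < 5:
--             return f(start + 1, end, count_1 + 1) + f(start + 3, end, count_1) + f(start * 2, end, count_1)
--         else:
--             return f(start + 3, end, count_1) + f(start * 2, end, count_1)
-- ===== SOURCE B (Python) =====
-- def f(start, end, count_1):
--     memo = {}
--     def go(s, c):
--         if s == end:
--             return 1
--         if s > end or s == 11 or s == 35: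
--             return 0
--         if (s, c) in memo:
--             return memo[(s, c)]
--         if c < 5:
--             r = go(s + 1, c + 1) + go(s + 3, c) + go(s * 2, c)
--         else:
--             r = go(s + 3, c) + go(s * 2, c)
--         memo[(s, c)] = r
--         return r
--     return go(start, count_1)
-- ===== Notes on version B (the rewrite author's own statement) =====
-- stated objective: faster
-- what changed: B replaces A's plain exponential recursion by a memoized recursion on the state (start, count_1), so each reachable state is computed once.
import Mathlib
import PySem

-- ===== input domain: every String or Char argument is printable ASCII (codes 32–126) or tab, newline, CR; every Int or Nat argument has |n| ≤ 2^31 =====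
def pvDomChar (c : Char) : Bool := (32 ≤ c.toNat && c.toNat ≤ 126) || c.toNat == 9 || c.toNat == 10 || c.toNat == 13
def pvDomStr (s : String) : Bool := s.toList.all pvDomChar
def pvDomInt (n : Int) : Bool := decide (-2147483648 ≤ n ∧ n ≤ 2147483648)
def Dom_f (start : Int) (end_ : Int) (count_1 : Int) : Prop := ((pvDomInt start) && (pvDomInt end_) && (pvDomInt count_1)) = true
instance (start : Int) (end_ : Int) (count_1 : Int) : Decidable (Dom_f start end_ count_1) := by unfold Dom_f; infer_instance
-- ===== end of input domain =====

-- B memoizes A's recursion on the state (start, count_1); same return value, asymptotically fewer calls.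

-- ===== PORT A =====
-- Literal port of A's recursion; the fuel argument only makes it total in Lean
-- (it is strictly larger than the recursion depth on every input Pre_f admits).
def fA : Nat → Int → Int → Int → Int
  | 0, _, _, _ => 0
  | (n+1), s, e, c =>
    if s = e then 1
    else if e < s ∨ s = 11 ∨ s = 35 then 0
    else if c < 5 then fA n (s+1) e (c+1) + fA n (s+3) e c + fA n (s*2) e c
    else fA n (s+3) e c + fA n (s*2) e c

def f (start : Int) (end_ : Int) (count_1 : Int) : Int :=
  fA ((end_ - start).toNat + 1) start end_ count_1

-- ===== PORT B =====
-- Literal port of Source B's inner `go`, threading the memo dict through the calls;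
-- the fuel argument only makes it total in Lean (sufficient under Pre_f).
def goB (e : Int) : Nat → Int → Int → PySem.Dict (Int × Int) Int → Int × PySem.Dict (Int × Int) Int
  | 0, _, _, m => (0, m)
  | (n+1), s, c, m =>
    if s = e then (1, m)
    else if e < s ∨ s = 11 ∨ s = 35 then (0, m)
    else
      match m.get? (s, c) with
      | some v => (v, m)
      | none =>
        if c < 5 then
          let r1 := goB e n (s+1) (c+1) m
          let r2 := goB e n (s+3) c r1.2
          let r3 := goB e n (s*2) c r2.2
          let r := r1.1 + r2.1 + r3.1
          (r, r3.2.insert (s, c) r)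
        else
          let r2 := goB e n (s+3) c m
          let r3 := goB e n (s*2) c r2.2
          let r := r2.1 + r3.1
          (r, r3.2.insert (s, c) r)

def f_alt (start : Int) (end_ : Int) (count_1 : Int) : Int :=
  (goB end_ ((end_ - start).toNat + 1) start count_1 PySem.Dict.empty).1

-- ===== PRECONDITION & SPEC =====
-- Pre_f excludes exactly the inputs start ≤ 0 < end, on which the Python A (and B)
-- recurses forever through start*2 and dies with RecursionError; A returns on all other inputs.
def Pre_f (start : Int) (end_ : Int) (count_1 : Int) : Prop := 1 ≤ start ∨ end_ ≤ start
instance (start : Int) (end_ : Int) (count_1 : Int) : Decidable (Pre_f start end_ count_1) := by unfold Pre_f; infer_instance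
def pvWitness_f : Int × Int × Int := (1, 12, 0)

def Spec_f (start : Int) (end_ : Int) (count_1 : Int) (out : Int) : Prop := out = f_alt start end_ count_1
instance (start : Int) (end_ : Int) (count_1 : Int) (out : Int) : Decidable (Spec_f start end_ count_1 out) := by unfold Spec_f; infer_instance

-- ===== CLAIM (what is proved, stated in full; the proofs are below) =====
def Claim_equal_f : Prop := ∀ (start : Int) (end_ : Int) (count_1 : Int), Dom_f start end_ count_1 → Pre_f start end_ count_1 → Spec_f start end_ count_1 (f start end_ count_1)

-- ===== LEMMAS AND PROOFS =====

-- A's recursion does not depend on the fuel, as long as the fuel exceeds (e - s).toNat.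
theorem fA_fuel : ∀ (n : Nat) (m : Nat) (s e c : Int), 1 ≤ s →
    (e - s).toNat < n → (e - s).toNat < m → fA n s e c = fA m s e c := by
  intro n
  induction n with
  | zero => intro m s e c _ h; omega
  | succ n ih =>
    intro m s e c hs hn hm
    cases m with
    | zero => omega
    | succ m =>
      simp only [fA]
      by_cases h1 : s = e
      · simp [h1]
      · by_cases h2 : e < s ∨ s = 11 ∨ s = 35
        · simp [h1, h2]
        · have hse : s < e := by
            rcases lt_trichotomy s e with h | h | h
            · exact h
            · exact absurd h h1
            · exact absurd (Or.inl h) h2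
          simp only [h1, h2, if_false, if_neg]
          have k1 : (e - (s+1)).toNat < n ∧ (e - (s+1)).toNat < m := by omega
          have k3 : (e - (s+3)).toNat < n ∧ (e - (s+3)).toNat < m := by omega
          have hs2 : s + 1 ≤ s * 2 := by nlinarith
          have k2 : (e - s*2).toNat < n ∧ (e - s*2).toNat < m := by omega
          rw [ih m (s+1) e (c+1) (by omega) k1.1 k1.2,
              ih m (s+3) e c (by omega) k3.1 k3.2,
              ih m (s*2) e c (by omega) k2.1 k2.2]

-- The memo invariant: every stored value is the A-value of its key.
def GoodMemo (e : Int) (m : PySem.Dict (Int × Int) Int) : Prop :=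
  ∀ s c v, m.get? (s, c) = some v → v = fA ((e - s).toNat + 1) s e c

-- Main invariant: with enough fuel, a good memo, and 1 ≤ s, goB returns A's value and keeps the memo good.
theorem goB_correct (e : Int) : ∀ (n : Nat) (s c : Int) (m : PySem.Dict (Int × Int) Int),
    1 ≤ s → (e - s).toNat < n → GoodMemo e m →
    (goB e n s c m).1 = fA ((e - s).toNat + 1) s e c ∧ GoodMemo e (goB e n s c m).2 := by
  intro n
  induction n with
  | zero => intro s c m _ h; omega
  | succ n ih =>
    intro s c m hs hn hg
    simp only [goB, fA]
    by_cases h1 : s = e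
    · simp [h1, hg]
    · by_cases h2 : e < s ∨ s = 11 ∨ s = 35
      · simp [h1, h2, hg]
      · have hse : s < e := by
          rcases lt_trichotomy s e with h | h | h
          · exact h
          · exact absurd h h1
          · exact absurd (Or.inl h) h2
        simp only [h1, h2, if_false, if_neg]
        cases hmem : m.get? (s, c) with
        | some v =>
          constructor
          · have := hg s c v hmem
            simp only [fA] at this
            simp [this, h1, h2]
          · exact hg
        | none =>
          have hs2 : s + 1 ≤ s * 2 := by nlinarith
          by_cases hc : c < 5
          · simp only [hc, if_true]
            obtain ⟨v1, g1⟩ := ih (s+1) (c+1) m (by omega) (by omega) hg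
            obtain ⟨v2, g2⟩ := ih (s+3) c _ (by omega) (by omega) g1
            obtain ⟨v3, g3⟩ := ih (s*2) c _ (by omega) (by omega) g2
            have e1 : fA ((e - (s+1)).toNat + 1) (s+1) e (c+1) = fA (e - s).toNat (s+1) e (c+1) :=
              fA_fuel _ _ _ _ _ (by omega) (by omega) (by omega)
            have e2 : fA ((e - (s+3)).toNat + 1) (s+3) e c = fA (e - s).toNat (s+3) e c :=
              fA_fuel _ _ _ _ _ (by omega) (by omega) (by omega)
            have e3 : fA ((e - (s*2)).toNat + 1) (s*2) e c = fA (e - s).toNat (s*2) e c :=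
              fA_fuel _ _ _ _ _ (by omega) (by omega) (by omega)
            have hval : (goB e n (s+1) (c+1) m).1
                + (goB e n (s+3) c (goB e n (s+1) (c+1) m).2).1
                + (goB e n (s*2) c (goB e n (s+3) c (goB e n (s+1) (c+1) m).2).2).1
                = fA (e - s).toNat (s+1) e (c+1) + fA (e - s).toNat (s+3) e c
                  + fA (e - s).toNat (s*2) e c := by
              rw [v1, v2, v3, e1, e2, e3]
            refine ⟨by simpa using hval, ?_⟩
            intro s' c' v hv
            rw [PySem.Dict.get?_insert] at hv
            by_cases hk : (s', c') = (s, c)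
            · rw [if_pos hk] at hv
              injection hk with hks hkc; rw [hks, hkc]
              have target : fA ((e - s).toNat + 1) s e c
                  = fA (e - s).toNat (s+1) e (c+1) + fA (e - s).toNat (s+3) e c
                    + fA (e - s).toNat (s*2) e c := by
                simp only [fA]; simp [h1, h2, hc]
              rw [target, ← hval]
              exact (Option.some.inj hv).symm
            · rw [if_neg hk] at hv
              exact g3 s' c' v hv
          · simp only [hc, if_false]
            obtain ⟨v2, g2⟩ := ih (s+3) c m (by omega) (by omega) hg
            obtain ⟨v3, g3⟩ := ih (s*2) c _ (by omega) (by omega) g2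
            have e2 : fA ((e - (s+3)).toNat + 1) (s+3) e c = fA (e - s).toNat (s+3) e c :=
              fA_fuel _ _ _ _ _ (by omega) (by omega) (by omega)
            have e3 : fA ((e - (s*2)).toNat + 1) (s*2) e c = fA (e - s).toNat (s*2) e c :=
              fA_fuel _ _ _ _ _ (by omega) (by omega) (by omega)
            have hval : (goB e n (s+3) c m).1 + (goB e n (s*2) c (goB e n (s+3) c m).2).1
                = fA (e - s).toNat (s+3) e c + fA (e - s).toNat (s*2) e c := by
              rw [v2, v3, e2, e3]
            refine ⟨by simpa using hval, ?_⟩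
            intro s' c' v hv
            rw [PySem.Dict.get?_insert] at hv
            by_cases hk : (s', c') = (s, c)
            · rw [if_pos hk] at hv
              injection hk with hks hkc; rw [hks, hkc]
              have target : fA ((e - s).toNat + 1) s e c
                  = fA (e - s).toNat (s+3) e c + fA (e - s).toNat (s*2) e c := by
                simp only [fA]; simp [h1, h2, hc]
              rw [target, ← hval]
              exact (Option.some.inj hv).symm
            · rw [if_neg hk] at hv
              exact g3 s' c' v hv

-- ===== VERDICT (by name: the statement is the Claim_ definition above) =====
theorem f_spec : Claim_equal_f := by
  intro start end_ count_1 _ hpre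
  unfold Spec_f f f_alt
  rcases hpre with hs | he
  · obtain ⟨hv, _⟩ := goB_correct end_ ((end_ - start).toNat + 1) start count_1
      PySem.Dict.empty hs (by omega)
      (by intro s c v hv; simp [PySem.Dict.get?_empty] at hv)
    exact hv.symm
  · have h0 : (end_ - start).toNat = 0 := by omega
    rw [h0]
    simp only [fA, goB]
    by_cases h1 : start = end_
    · simp [h1]
    · have : end_ < start := by omega
      simp [h1, this]
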